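-- pv_equiv track=rewrite | github.com/dciresearch/llm_auth_api | docker_manager/spawn_logic.py | get_gpu_breakdown
-- ===== SOURCE A (Python) =====
-- def get_gpu_breakdown(gpu_needed):
--     tp = 1
--     pp = 1
--     while gpu_needed > 1:
--         if gpu_needed % 2 == 0:
--             tp *= 2
--             gpu_needed //= 2
--         else:
--             pp = gpu_needed
--             gpu_needed = 1
--     return tp, pp
-- ===== SOURCE B (Python) =====
-- def get_gpu_breakdown(gpu_needed):
--     # Recursive decomposition: halve the input each call, no accumulators.
--     if gpu_needed <= 1:
--         return 1, 1
--     if gpu_needed % 2: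
--         return 1, gpu_needed
--     tp, pp = get_gpu_breakdown(gpu_needed // 2)
--     return 2 * tp, pp
-- ===== Notes on version B (the rewrite author's own statement) =====
-- stated objective: alternative
-- what changed: Replaces the iterative while-loop with mutable accumulators (tp, pp) by a direct structural recursion that halves the input each call and builds the power-of-two factor on the way back up.
import Mathlib
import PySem

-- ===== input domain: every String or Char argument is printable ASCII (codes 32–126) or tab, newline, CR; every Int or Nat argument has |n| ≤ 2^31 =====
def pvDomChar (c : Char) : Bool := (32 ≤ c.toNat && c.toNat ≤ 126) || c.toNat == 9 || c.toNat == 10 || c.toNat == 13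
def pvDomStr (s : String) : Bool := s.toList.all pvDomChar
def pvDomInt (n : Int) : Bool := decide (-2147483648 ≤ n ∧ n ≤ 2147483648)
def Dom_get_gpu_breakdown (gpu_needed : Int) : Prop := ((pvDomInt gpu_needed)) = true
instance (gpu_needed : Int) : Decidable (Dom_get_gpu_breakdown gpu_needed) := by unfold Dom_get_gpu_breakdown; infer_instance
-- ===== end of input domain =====

-- B replaces A's while-loop with accumulators by a direct structural recursion that halves the input each call (alternative decomposition, same cost).


-- ===== PORT A =====
-- A's while-loop: state (gpu_needed, tp, pp); terminates since gpu_needed strictly decreases.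
def gpuLoop (gpu_needed tp pp : Int) : Int × Int :=
  if h : gpu_needed > 1 then
    if PySem.Int.mod gpu_needed 2 = 0 then
      gpuLoop (PySem.Int.floordiv gpu_needed 2) (tp * 2) pp
    else
      -- pp = gpu_needed; gpu_needed = 1; next loop test fails
      (tp, gpu_needed)
  else (tp, pp)
termination_by gpu_needed.toNat
decreasing_by
  rw [PySem.Int.floordiv_eq_ediv_of_pos (by omega)]
  omega

def get_gpu_breakdown (gpu_needed : Int) : Int × Int :=
  gpuLoop gpu_needed 1 1

-- ===== PORT B =====
def get_gpu_breakdown_alt (gpu_needed : Int) : Int × Int :=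
  if h : gpu_needed ≤ 1 then (1, 1)
  else if PySem.Int.mod gpu_needed 2 ≠ 0 then (1, gpu_needed)
  else
    let p := get_gpu_breakdown_alt (PySem.Int.floordiv gpu_needed 2)
    (2 * p.1, p.2)
termination_by gpu_needed.toNat
decreasing_by
  rw [PySem.Int.floordiv_eq_ediv_of_pos (by omega)]
  omega

-- ===== PRECONDITION & SPEC =====
def Spec_get_gpu_breakdown (gpu_needed : Int) (out : Int × Int) : Prop := out = get_gpu_breakdown_alt gpu_needed
instance (gpu_needed : Int) (out : Int × Int) : Decidable (Spec_get_gpu_breakdown gpu_needed out) := by unfold Spec_get_gpu_breakdown; infer_instance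

-- ===== CLAIM (what is proved, stated in full; the proofs are below) =====
def Claim_equal_get_gpu_breakdown : Prop := ∀ (gpu_needed : Int), Dom_get_gpu_breakdown gpu_needed → Spec_get_gpu_breakdown gpu_needed (get_gpu_breakdown gpu_needed)

-- ===== LEMMAS AND PROOFS =====

-- Loop invariant: with pp = 1 in the state, A's loop multiplies B's power-of-two
-- factor into tp and returns B's odd factor.
theorem gpuLoop_eq_alt (k : Nat) : ∀ (n tp : Int), n.toNat ≤ k →
    gpuLoop n tp 1 = (tp * (get_gpu_breakdown_alt n).1, (get_gpu_breakdown_alt n).2) := by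
  induction k with
  | zero =>
    intro n tp hn
    have h1 : ¬ n > 1 := by omega
    rw [gpuLoop, get_gpu_breakdown_alt]
    simp [h1, show n ≤ 1 by omega]
  | succ k ih =>
    intro n tp hn
    by_cases h1 : n > 1
    · have hm : PySem.Int.mod n 2 = n % 2 := PySem.Int.mod_eq_emod_of_pos (by omega)
      have hd : PySem.Int.floordiv n 2 = n / 2 := PySem.Int.floordiv_eq_ediv_of_pos (by omega)
      by_cases h2 : n % 2 = 0
      · rw [gpuLoop, get_gpu_breakdown_alt]
        simp only [hm, hd, dif_pos h1, dif_neg (show ¬ n ≤ 1 by omega), h2, ite_true,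
          ne_eq, not_true_eq_false, ite_false]
        rw [ih (n / 2) (tp * 2) (by omega)]
        exact Prod.ext (by ring) rfl
      · rw [gpuLoop, get_gpu_breakdown_alt]
        have h2' : n % 2 = 1 := by omega
        simp only [hm, dif_pos h1, dif_neg (show ¬ n ≤ 1 by omega), h2', ne_eq]
        norm_num
    · rw [gpuLoop, get_gpu_breakdown_alt]
      simp [h1, show n ≤ 1 by omega]

-- ===== VERDICT (by name: the statement is the Claim_ definition above) =====
theorem get_gpu_breakdown_spec : Claim_equal_get_gpu_breakdown := by
  intro n _
  show gpuLoop n 1 1 = get_gpu_breakdown_alt n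
  rw [gpuLoop_eq_alt n.toNat n 1 le_rfl, one_mul]
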